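-- pv_equiv track=rewrite | github.com/rocketboosters/dftxt | dftxt/_cast/_categorical.py | encode_categorical_ordering
-- ===== SOURCE A (Python) =====
-- import typing
--
-- def encode_categorical_ordering(
--     order: typing.List[typing.Any], values: typing.List[typing.Any]
-- ) -> str:
--     """Serialize categorical ordering for preservation in dftxt outputs."""
--     distinct = set(values)
--     defined = set(order)
--
--     has_all = distinct == defined
--
--     if has_all and order == list(sorted(order)):
--         return "az"
--     if has_all and order == list(sorted(order, reverse=True)):
--         return "za"
--
--     delimiter = "" if has_all and len(distinct) < 10 else ","
--
--     available_indexed = [(values.index(v), v) for v in distinct]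
--     physical_ordered = [v[1] for v in sorted(available_indexed, key=lambda v: v[0])]
--     if order == physical_ordered:
--         return ""
--     return delimiter.join(
--         [str(physical_ordered.index(v)) if v in distinct else v for v in order]
--     )
-- ===== SOURCE B (Python) =====
-- def encode_categorical_ordering(order, values):
--     """Serialize categorical ordering for preservation in dftxt outputs."""
--     seen = set()
--     physical = []
--     for v in values:
--         if v not in seen:
--             seen.add(v)
--             physical.append(v)
--
--     has_all = seen == set(order)
--
--     if has_all and all(a <= b for a, b in zip(order, order[1:])):
--         return "az"
--     if has_all and all(b <= a for a, b in zip(order, order[1:])):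
--         return "za"
--     if order == physical:
--         return ""
--
--     delimiter = "" if has_all and len(physical) < 10 else ","
--     pos = {v: i for i, v in enumerate(physical)}
--     return delimiter.join(str(pos[v]) if v in pos else v for v in order)
-- ===== Notes on version B (the rewrite author's own statement) =====
-- stated objective: faster
-- what changed: B builds the first-occurrence list in one linear pass with a seen-set (instead of calling values.index for every distinct value and sorting the (index, value) pairs), replaces both sortedness checks order == sorted(order[, reverse=True]) with adjacent-pair comparisons, and emits codes via a value-to-position dictionary instead of repeated physical_ordered.index scans.
import Mathlib
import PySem

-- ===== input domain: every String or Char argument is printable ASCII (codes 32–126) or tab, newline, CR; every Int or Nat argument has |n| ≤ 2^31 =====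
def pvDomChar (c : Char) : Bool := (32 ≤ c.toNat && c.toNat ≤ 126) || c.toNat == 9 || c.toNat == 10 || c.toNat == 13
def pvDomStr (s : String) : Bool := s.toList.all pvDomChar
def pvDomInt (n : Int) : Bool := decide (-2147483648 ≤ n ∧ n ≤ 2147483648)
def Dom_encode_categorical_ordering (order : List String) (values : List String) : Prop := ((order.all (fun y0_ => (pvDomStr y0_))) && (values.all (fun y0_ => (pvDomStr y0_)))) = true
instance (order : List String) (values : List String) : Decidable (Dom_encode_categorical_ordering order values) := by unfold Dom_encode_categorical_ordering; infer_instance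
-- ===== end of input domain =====

-- B replaces A's per-distinct-value `values.index` scans + sort with one first-occurrence pass,
-- replaces the two sorts in the az/za checks with adjacent-pair comparisons, and looks up output
-- codes in a position dictionary (objective: faster, no sort / no quadratic index scans).

-- ===== PORT A =====
-- A iterates over the set `distinct` only to build `available_indexed`, which is then sorted by a
-- key injective on the set, so the result does not depend on Python's set iteration order.
def encode_categorical_ordering (order : List String) (values : List String) : String :=
  let distinct : PySem.Set String := PySem.Set.ofList values
  let defined : PySem.Set String := PySem.Set.ofList order
  let has_all := PySem.Set.equal distinct defined
  if has_all && decide (order = PySem.List.sorted order (fun x => x)) then "az"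
  else if has_all && decide (order = PySem.List.sorted order (fun x => x) true) then "za"
  else
    let delimiter := if has_all && decide (PySem.Set.len distinct < 10) then "" else ","
    -- values.index(v) always succeeds here (v ∈ set(values)); the .getD 0 is never the fallback
    let available_indexed := distinct.map (fun v => ((PySem.List.index? values v).getD 0, v))
    let physical_ordered := (PySem.List.sorted available_indexed (fun p => p.1)).map (fun p => p.2)
    if order = physical_ordered then ""
    else
      PySem.Str.join delimiter (order.map (fun v =>
        if PySem.Set.contains distinct v then
          PySem.Int.toStr (((PySem.List.index? physical_ordered v).getD 0 : Nat) : Int)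
        else v))

-- ===== PORT B =====
def encode_categorical_ordering_alt (order : List String) (values : List String) : String :=
  let st := values.foldl
    (fun st v => if PySem.Set.contains st.1 v then st else (PySem.Set.add st.1 v, st.2 ++ [v]))
    ((PySem.Set.empty : PySem.Set String), ([] : List String))
  let physical := st.2
  let has_all := PySem.Set.equal st.1 (PySem.Set.ofList order)
  if has_all && (order.zip (PySem.List.slice order (some 1) none)).all (fun p => decide (p.1 ≤ p.2)) then "az"
  else if has_all && (order.zip (PySem.List.slice order (some 1) none)).all (fun p => decide (p.2 ≤ p.1)) then "za"
  else if order = physical then ""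
  else
    let delimiter := if has_all && decide ((physical.length : Int) < 10) then "" else ","
    let pos := (PySem.List.enumerate physical).foldl (fun d p => d.insert p.2 p.1)
      (PySem.Dict.empty : PySem.Dict String Int)
    PySem.Str.join delimiter (order.map (fun v =>
      if pos.contains v then PySem.Int.toStr (pos.getD v 0) else v))

-- ===== PRECONDITION & SPEC =====
def Spec_encode_categorical_ordering (order : List String) (values : List String) (out : String) : Prop := out = encode_categorical_ordering_alt order values
instance (order : List String) (values : List String) (out : String) : Decidable (Spec_encode_categorical_ordering order values out) := by unfold Spec_encode_categorical_ordering; infer_instance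

-- ===== CLAIM (what is proved, stated in full; the proofs are below) =====
def Claim_equal_encode_categorical_ordering : Prop := ∀ (order : List String) (values : List String), Dom_encode_categorical_ordering order values → Spec_encode_categorical_ordering order values (encode_categorical_ordering order values)

-- ===== LEMMAS AND PROOFS =====

-- B's first-occurrence loop computes (set(values), first-occurrence list), and the two agree.
lemma foldl_seen_phys (values : List String) (s : PySem.Set String) :
    values.foldl
      (fun st v => if PySem.Set.contains st.1 v then st else (PySem.Set.add st.1 v, st.2 ++ [v]))
      (s, (s : List String)) = (PySem.Set.update s values, PySem.Set.update s values) := by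
  induction values generalizing s with
  | nil => rfl
  | cons x t ih =>
    simp only [List.foldl_cons]
    by_cases h : PySem.Set.contains s x = true
    · have hadd : PySem.Set.add s x = s := by
        simp [PySem.Set.add, (PySem.Set.contains_iff s x).mp h]
      simp only [h, if_pos]
      rw [show PySem.Set.update s (x :: t) = PySem.Set.update (PySem.Set.add s x) t from rfl, hadd]
      exact ih s
    · have hadd : PySem.Set.add s x = s ++ [x] := by
        have hx' : x ∉ s := fun hm => h ((PySem.Set.contains_iff s x).mpr hm)
        simp [PySem.Set.add, hx']
      simp only [h, if_neg, Bool.false_eq_true, not_false_iff]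
      rw [show PySem.Set.update s (x :: t) = PySem.Set.update (PySem.Set.add s x) t from rfl]
      rw [← hadd] at *
      exact ih (PySem.Set.add s x)

-- `order == sorted(order)` is the adjacent-pair nondecreasing check.
lemma az_eq (l : List String) :
    decide (l = PySem.List.sorted l (fun x => x))
      = (l.zip (l.drop 1)).all (fun p => decide (p.1 ≤ p.2)) := by
  rw [Bool.eq_iff_iff, decide_eq_true_iff]
  have hz : ((l.zip (l.drop 1)).all (fun p => decide (p.1 ≤ p.2)) = true) ↔ l.IsChain (· ≤ ·) := by
    induction l with
    | nil => simp
    | cons a t ih =>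
      cases t with
      | nil => simp
      | cons b u =>
        simp only [List.drop_succ_cons, List.drop_zero, List.zip_cons_cons, List.all_cons,
          Bool.and_eq_true, decide_eq_true_eq] at *
        rw [List.isChain_cons_cons, ← ih]
  rw [hz, List.isChain_iff_pairwise]
  constructor
  · intro h; rw [h]; exact PySem.List.sorted_pairwise l (fun x => x)
  · intro h; exact (PySem.List.sorted_eq_self_of_pairwise l (fun x => x) h).symm

-- `order == sorted(order, reverse=True)` is the adjacent-pair nonincreasing check.
lemma za_eq (l : List String) :
    decide (l = PySem.List.sorted l (fun x => x) true)
      = (l.zip (l.drop 1)).all (fun p => decide (p.2 ≤ p.1)) := by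
  rw [Bool.eq_iff_iff, decide_eq_true_iff]
  have hz : ((l.zip (l.drop 1)).all (fun p => decide (p.2 ≤ p.1)) = true) ↔ l.IsChain (fun a b => b ≤ a) := by
    induction l with
    | nil => simp
    | cons a t ih =>
      cases t with
      | nil => simp
      | cons b u =>
        simp only [List.drop_succ_cons, List.drop_zero, List.zip_cons_cons, List.all_cons,
          Bool.and_eq_true, decide_eq_true_eq] at *
        rw [List.isChain_cons_cons, ← ih]
  have : Trans (fun a b : String => b ≤ a) (fun a b : String => b ≤ a) (fun a b : String => b ≤ a) :=
    ⟨fun hab hbc => le_trans hbc hab⟩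
  rw [hz, List.isChain_iff_pairwise]
  constructor
  · intro h; rw [h]; exact PySem.List.sorted_pairwise_rev l (fun x => x)
  · intro h; exact (PySem.List.sorted_rev_eq_self_of_pairwise l (fun x => x) h).symm

-- first-occurrence indices into xs are strictly increasing along set(xs)
lemma pairwise_index_ofList (xs : List String) :
    (PySem.Set.ofList xs).Pairwise
      (fun a b => (PySem.List.index? xs a).getD 0 < (PySem.List.index? xs b).getD 0) := by
  induction xs using List.reverseRecOn with
  | nil => simp [PySem.Set.ofList]
  | append_singleton t x ih =>
    have hofl : PySem.Set.ofList (t ++ [x]) = PySem.Set.add (PySem.Set.ofList t) x := by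
      rw [PySem.Set.ofList_eq_foldl, PySem.Set.ofList_eq_foldl, List.foldl_append]
      rfl
    by_cases hx : x ∈ PySem.Set.ofList t
    · have hxt : x ∈ t := (PySem.Set.mem_ofList t x).mp hx
      have hadd : PySem.Set.add (PySem.Set.ofList t) x = PySem.Set.ofList t := by
        simp [PySem.Set.add, hxt]
      rw [hofl, hadd]
      refine List.Pairwise.imp_of_mem ?_ ih
      intro a b ha hb hab
      have ha' : a ∈ t := (PySem.Set.mem_ofList t a).mp ha
      have hb' : b ∈ t := (PySem.Set.mem_ofList t b).mp hb
      rwa [PySem.List.index?_append_of_mem [x] ha', PySem.List.index?_append_of_mem [x] hb']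
    · have hxt : x ∉ t := fun hm => hx ((PySem.Set.mem_ofList t x).mpr hm)
      have hadd : PySem.Set.add (PySem.Set.ofList t) x = PySem.Set.ofList t ++ [x] := by
        simp [PySem.Set.add, hxt]
      rw [hofl, hadd, List.pairwise_append]
      refine ⟨?_, List.pairwise_singleton _ _, ?_⟩
      · refine List.Pairwise.imp_of_mem ?_ ih
        intro a b ha hb hab
        have ha' : a ∈ t := (PySem.Set.mem_ofList t a).mp ha
        have hb' : b ∈ t := (PySem.Set.mem_ofList t b).mp hb
        rwa [PySem.List.index?_append_of_mem [x] ha', PySem.List.index?_append_of_mem [x] hb']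
      · intro a ha b hb
        have hb' : b = x := List.mem_singleton.mp hb
        have ha' : a ∈ t := (PySem.Set.mem_ofList t a).mp ha
        have hxnt : x ∉ t := fun h => hx ((PySem.Set.mem_ofList t x).mpr h)
        rw [hb', PySem.List.index?_append_singleton_self t x hxnt,
          PySem.List.index?_append_of_mem [x] ha']
        obtain ⟨k, hk⟩ := Option.isSome_iff_exists.mp ((PySem.List.index?_isSome_iff t a).mpr ha')
        obtain ⟨hklt, -, -⟩ := PySem.List.getElem_of_index?_eq_some hk
        simp only [PySem.List.index?_eq_idxOf?] at hk ⊢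
        rw [hk]
        simpa using hklt

-- A's sort of the (first-index, value) pairs returns the first-occurrence list.
lemma physical_eq (values : List String) :
    (PySem.List.sorted
        ((PySem.Set.ofList values).map (fun v => ((PySem.List.index? values v).getD 0, v)))
        (fun p => p.1)).map (fun p => p.2) = PySem.Set.ofList values := by
  have hs := PySem.List.sorted_eq_self_of_pairwise
      ((PySem.Set.ofList values).map (fun v => ((PySem.List.index? values v).getD 0, v)))
      (fun p => p.1)
      (by
        rw [List.pairwise_map]
        exact (pairwise_index_ofList values).imp (fun h => le_of_lt h))
  rw [hs, List.map_map]
  exact List.map_id _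

-- dict keys untouched by a fold over other keys
lemma getD_foldl_not_mem (l : List (Int × String)) (d : PySem.Dict String Int) (v : String)
    (hv : v ∉ l.map (·.2)) :
    (l.foldl (fun d p => d.insert p.2 p.1) d).getD v 0 = d.getD v 0 := by
  induction l generalizing d with
  | nil => rfl
  | cons p t ih =>
    simp only [List.map_cons, List.mem_cons, not_or] at hv
    simp only [List.foldl_cons]
    rw [ih _ hv.2, PySem.Dict.getD_insert, if_neg hv.1]

-- B's position dictionary looks up the first-occurrence index.
lemma getD_enum_foldl (phys : List String) (hnd : phys.Nodup) (v : String) (hv : v ∈ phys) :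
    ∀ (n : Int) (d : PySem.Dict String Int),
    ((PySem.List.enumerate phys n).foldl (fun d p => d.insert p.2 p.1) d).getD v 0
      = n + ((PySem.List.index? phys v).getD 0 : Nat) := by
  induction phys with
  | nil => cases hv
  | cons x t ih =>
    intro n d
    have henum : PySem.List.enumerate (x :: t) n = (n, x) :: PySem.List.enumerate t (n + 1) := by
      simp [PySem.List.enumerate]
    have hsnd : (PySem.List.enumerate t (n + 1)).map (·.2) = t := by
      simp
    rw [henum, List.foldl_cons]
    rcases List.mem_cons.mp hv with h | h
    · subst h
      have hvt : v ∉ t := (List.nodup_cons.mp hnd).1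
      rw [getD_foldl_not_mem _ _ _ (by rwa [hsnd]), PySem.Dict.getD_insert, if_pos rfl,
        PySem.List.index?_cons_self]
      simp
    · have hne : x ≠ v := fun he => (List.nodup_cons.mp hnd).1 (he ▸ h)
      rw [ih (List.nodup_cons.mp hnd).2 h (n + 1) _, PySem.List.index?_cons_of_ne t hne]
      obtain ⟨k, hk⟩ := Option.isSome_iff_exists.mp ((PySem.List.index?_isSome_iff t v).mpr h)
      rw [hk]
      simp only [Option.map_some, Option.getD_some]
      push_cast
      ring

-- B's dict membership test is A's membership test in set(values).
lemma contains_pos (values : List String) (v : String) :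
    ((PySem.List.enumerate (PySem.Set.ofList values)).foldl (fun d p => d.insert p.2 p.1)
        (PySem.Dict.empty : PySem.Dict String Int)).contains v
      = PySem.Set.contains (PySem.Set.ofList values) v := by
  have hsnd : (PySem.List.enumerate (PySem.Set.ofList values)).map (·.2)
      = (PySem.Set.ofList values : List String) := by
    simp
  rw [Bool.eq_iff_iff, PySem.Dict.contains_iff_mem_keys]
  rw [PySem.Dict.keys_foldl_insert_key (κ := String) (ν := Int)
    (PySem.List.enumerate (PySem.Set.ofList values)) (fun p => p.2) (fun _ p => p.1)
    PySem.Dict.empty]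
  rw [hsnd]
  have hupd : PySem.Set.update ((PySem.Dict.empty : PySem.Dict String Int)).keys
      (PySem.Set.ofList values : List String) = PySem.Set.ofList (PySem.Set.ofList values) := by
    rw [PySem.Set.ofList_eq_foldl]; rfl
  rw [hupd, PySem.Set.ofList_eq_self_of_nodup _ (PySem.Set.nodup_ofList values)]
  exact (PySem.Set.contains_iff _ v).symm

-- ===== VERDICT (by name: the statement is the Claim_ definition above) =====
theorem encode_categorical_ordering_spec : Claim_equal_encode_categorical_ordering := by
  intro order values _
  unfold Spec_encode_categorical_ordering
  unfold encode_categorical_ordering encode_categorical_ordering_alt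
  have hst := foldl_seen_phys values []
  rw [show PySem.Set.update ([] : PySem.Set String) values = PySem.Set.ofList values from
    (PySem.Set.ofList_eq_foldl values).symm] at hst
  simp only [PySem.Set.empty] at hst ⊢
  simp only [hst]
  simp only [az_eq order, za_eq order, PySem.List.slice_from order (by norm_num : (0:Int) ≤ 1)]
  simp only [show ((1:Int)).toNat = 1 from rfl]
  simp only [physical_eq values]
  by_cases haz : (PySem.Set.equal (PySem.Set.ofList values) (PySem.Set.ofList order)
      && (order.zip (order.drop 1)).all fun p => decide (p.1 ≤ p.2)) = true
  · rw [if_pos haz, if_pos haz]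
  · simp only [Bool.not_eq_true] at haz
    rw [if_neg (ne_true_of_eq_false haz), if_neg (ne_true_of_eq_false haz)]
    by_cases hza : (PySem.Set.equal (PySem.Set.ofList values) (PySem.Set.ofList order)
        && (order.zip (order.drop 1)).all fun p => decide (p.2 ≤ p.1)) = true
    · rw [if_pos hza, if_pos hza]
    · simp only [Bool.not_eq_true] at hza
      rw [if_neg (ne_true_of_eq_false hza), if_neg (ne_true_of_eq_false hza)]
      by_cases hpo : order = (PySem.Set.ofList values : List String)
      · rw [if_pos hpo, if_pos hpo]
      · rw [if_neg hpo, if_neg hpo]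
        have hlen : PySem.Set.len (PySem.Set.ofList values)
            = ((PySem.Set.ofList values : List String).length : Int) := rfl
        rw [hlen]
        congr 1
        apply List.map_congr_left
        intro v _
        rw [contains_pos values v]
        by_cases hc : PySem.Set.contains (PySem.Set.ofList values) v = true
        · rw [if_pos hc, if_pos hc]
          have hvmem : v ∈ (PySem.Set.ofList values : List String) :=
            (PySem.Set.contains_iff _ v).mp hc
          rw [getD_enum_foldl _ (PySem.Set.nodup_ofList values) v hvmem 0 _]
          norm_num
        · rw [if_neg hc, if_neg hc]
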